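-- pv_equiv track=rewrite | github.com/faithafex22/ATS_22 | Week_3/binary.py | convert
-- ===== SOURCE A (Python) =====
-- def convert(binary):
--     power = 0
--     num = 0
--     while binary > 0:
--         num = num + ((binary % 10) * 2**power)
--         binary = binary // 10
--         power += 1
--     return num
-- ===== SOURCE B (Python) =====
-- def convert(binary):
--     if binary <= 0:
--         return 0
--     return convert(binary // 10) * 2 + binary % 10
-- ===== Notes on version B (the rewrite author's own statement) =====
-- stated objective: simpler
-- what changed: Replaces the iterative loop with its separate power-of-two exponent accumulator by a direct recursive Horner formulation (double the recursive result on the higher digits and add the last digit), eliminating both mutable accumulators.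
import Mathlib
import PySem

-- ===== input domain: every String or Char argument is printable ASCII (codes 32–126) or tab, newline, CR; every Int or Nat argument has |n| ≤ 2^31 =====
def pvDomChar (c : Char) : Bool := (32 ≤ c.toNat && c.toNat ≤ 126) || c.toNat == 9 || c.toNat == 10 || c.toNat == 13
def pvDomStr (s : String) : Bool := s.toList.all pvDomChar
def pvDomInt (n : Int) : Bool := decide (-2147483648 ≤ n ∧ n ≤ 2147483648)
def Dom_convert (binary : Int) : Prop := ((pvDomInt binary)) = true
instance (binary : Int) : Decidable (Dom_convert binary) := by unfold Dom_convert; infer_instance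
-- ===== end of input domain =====

-- B: recursive Horner form convert(b//10)*2 + b%10 instead of A's loop with power/num accumulators (simpler).


-- ===== PORT A =====
def convertLoop (binary power num : Int) : Int :=
  if binary > 0 then
    convertLoop (PySem.Int.floordiv binary 10) (power + 1)
      (num + (PySem.Int.mod binary 10) * 2 ^ power.toNat)
  else num
termination_by binary.toNat
decreasing_by
  rename_i h
  rw [PySem.Int.floordiv_eq_ediv_of_pos (by omega : (0:Int) < 10)]
  omega

def convert (binary : Int) : Int := convertLoop binary 0 0

-- ===== PORT B =====
def convert_alt (binary : Int) : Int :=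
  if binary ≤ 0 then 0
  else convert_alt (PySem.Int.floordiv binary 10) * 2 + PySem.Int.mod binary 10
termination_by binary.toNat
decreasing_by
  rename_i h
  rw [PySem.Int.floordiv_eq_ediv_of_pos (by omega : (0:Int) < 10)]
  omega

-- ===== PRECONDITION & SPEC =====
def Spec_convert (binary : Int) (out : Int) : Prop := out = convert_alt binary
instance (binary : Int) (out : Int) : Decidable (Spec_convert binary out) := by unfold Spec_convert; infer_instance

-- ===== CLAIM (what is proved, stated in full; the proofs are below) =====
def Claim_equal_convert : Prop := ∀ (binary : Int), Dom_convert binary → Spec_convert binary (convert binary)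

-- ===== LEMMAS AND PROOFS =====

-- loop invariant: A's loop adds 2^power times the Horner value of the remaining digits
theorem convertLoop_eq (binary power num : Int) (hp : 0 ≤ power) :
    convertLoop binary power num = num + 2 ^ power.toNat * convert_alt binary := by
  fun_induction convertLoop binary power num with
  | case1 b p n h ih =>
    rw [ih (by omega)]
    have hb : convert_alt b
        = convert_alt (PySem.Int.floordiv b 10) * 2 + PySem.Int.mod b 10 := by
      rw [convert_alt]
      rw [if_neg (by omega : ¬ b ≤ 0)]
    rw [hb, (by omega : (p + 1).toNat = p.toNat + 1), pow_succ]
    ring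
  | case2 b p n h =>
    rw [convert_alt]
    rw [if_pos (by omega : b ≤ 0)]
    ring

-- ===== VERDICT (by name: the statement is the Claim_ definition above) =====
theorem convert_spec : Claim_equal_convert := by
  intro binary _
  unfold Spec_convert convert
  rw [convertLoop_eq binary 0 0 le_rfl]
  norm_num
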